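-- pv_equiv track=rewrite | github.com/chrisxue815/leetcode_python | problems/test_0541.py | reverseStr
-- ===== SOURCE A (Python) =====
-- def reverseStr(s, k):
--     """
--     :type s: str
--     :type k: int
--     :rtype: str
--     """
--     chars = list(s)
--     l = len(s)
--     left = 0
--
--     while left < l:
--         reverse_len = min(k, l - left)
--         right = left + reverse_len - 1
--         for i in range(reverse_len // 2):
--             chars[left + i], chars[right - i] = chars[right - i], chars[left + i]
--         left = right + 1 + k
--
--     return ''.join(chars)
-- ===== SOURCE B (Python) =====
-- def reverseStr(s, k):
--     pieces = []
--     i = 0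
--     n = len(s)
--     while i < n:
--         pieces.append(s[i:i+k][::-1])
--         pieces.append(s[i+k:i+2*k])
--         i += 2 * k
--     return ''.join(pieces)
-- ===== Notes on version B (the rewrite author's own statement) =====
-- stated objective: idiomatic
-- what changed: A mutates a char list with an inner index-swap loop per block; B builds the result from string slices (reversed first-k slice + unchanged next-k slice) appended per 2k window and joined once, with no in-place mutation.
import Mathlib
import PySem

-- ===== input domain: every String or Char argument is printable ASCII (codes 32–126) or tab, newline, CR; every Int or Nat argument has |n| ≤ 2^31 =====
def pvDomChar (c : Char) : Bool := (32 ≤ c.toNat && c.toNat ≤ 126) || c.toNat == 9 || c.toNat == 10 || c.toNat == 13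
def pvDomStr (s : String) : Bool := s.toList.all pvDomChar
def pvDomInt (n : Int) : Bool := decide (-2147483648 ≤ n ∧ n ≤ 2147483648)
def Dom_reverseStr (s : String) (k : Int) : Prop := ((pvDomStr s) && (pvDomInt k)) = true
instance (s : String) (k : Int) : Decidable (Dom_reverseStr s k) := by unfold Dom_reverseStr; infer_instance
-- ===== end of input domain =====

-- B rebuilds the result from string slices per 2k window instead of A's in-place
-- index swaps on a char list (idiomatic decomposition; return value only).
-- ===== PORT A =====
-- the while loop, fueled (inside Pre_ each iteration advances `left` by ≥ 2, so fuel = l + 1 suffices)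
def pvLoopA (l k : Int) : Nat → Int → List Char → List Char
  | 0, _, chars => chars
  | fuel + 1, left, chars =>
    if left < l then
      let revLen := min k (l - left)
      let right := left + revLen - 1
      -- for i in range(reverse_len // 2): simultaneous swap chars[left+i] <-> chars[right-i]
      let chars' := (PySem.List.pyRange 0 (PySem.Int.floordiv revLen 2) 1).foldl
        (fun ch i =>
          let a := ch.getD (right - i).toNat ' '
          let b := ch.getD (left + i).toNat ' '
          (ch.set (left + i).toNat a).set (right - i).toNat b) chars
      pvLoopA l k fuel (right + 1 + k) chars'
    else chars

def reverseStr (s : String) (k : Int) : String :=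
  let chars := s.toList
  let l : Int := chars.length
  String.ofList (pvLoopA l k (chars.length + 1) 0 chars)

-- ===== PORT B =====
-- Source B's while loop, fueled the same way; s[i:i+k][::-1] is (slice …).reverse (PySem.List.slice?_none_none_neg_one)
def pvLoopB (cs : List Char) (n k : Int) : Nat → Int → List Char → List Char
  | 0, _, acc => acc
  | fuel + 1, i, acc =>
    if i < n then
      let p1 := (PySem.List.slice cs (some i) (some (i + k))).reverse
      let p2 := PySem.List.slice cs (some (i + k)) (some (i + 2 * k))
      pvLoopB cs n k fuel (i + 2 * k) (acc ++ p1 ++ p2)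
    else acc

def reverseStr_alt (s : String) (k : Int) : String :=
  let cs := s.toList
  String.ofList (pvLoopB cs (cs.length) k (cs.length + 1) 0 [])

-- ===== PRECONDITION & SPEC =====
-- Pre_ excludes exactly the inputs where A never returns: for k ≤ 0 with s nonempty the while
-- loop's index stops advancing (or moves left) and A loops forever.
def Pre_reverseStr (s : String) (k : Int) : Prop := s = "" ∨ 1 ≤ k
instance (s : String) (k : Int) : Decidable (Pre_reverseStr s k) := by unfold Pre_reverseStr; infer_instance
def pvWitness_reverseStr : String × Int := ("abcdefg", 2)

def Spec_reverseStr (s : String) (k : Int) (out : String) : Prop := out = reverseStr_alt s k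
instance (s : String) (k : Int) (out : String) : Decidable (Spec_reverseStr s k out) := by unfold Spec_reverseStr; infer_instance

-- ===== CLAIM =====
def Claim_equal_reverseStr : Prop := ∀ (s : String) (k : Int), Dom_reverseStr s k → Pre_reverseStr s k → Spec_reverseStr s k (reverseStr s k)

-- ===== LEMMAS AND PROOFS =====

-- the inner swap loop reverses the segment of length m starting at position pre.length (Nat-index form)
theorem pv_swap_fold : ∀ (m : Nat) (pre seg post : List Char), seg.length = m →
    (List.range (m / 2)).foldl
      (fun ch t =>
        (ch.set (pre.length + t) (ch.getD (pre.length + m - 1 - t) ' ')).set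
          (pre.length + m - 1 - t) (ch.getD (pre.length + t) ' '))
      (pre ++ seg ++ post)
    = pre ++ seg.reverse ++ post := by
  intro m
  induction m using Nat.strong_induction_on with
  | _ m IH =>
    intro pre seg post hm
    rcases Nat.lt_or_ge m 2 with hm2 | hm2
    · interval_cases m
      · have : seg = [] := List.eq_nil_of_length_eq_zero hm
        subst this; simp
      · obtain ⟨c, rfl⟩ := List.length_eq_one_iff.mp hm
        simp
    · -- m ≥ 2 : seg = c :: mid ++ [d]
      obtain ⟨c, rest, rfl⟩ : ∃ c rest, seg = c :: rest := by
        cases seg with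
        | nil => simp at hm; omega
        | cons c rest => exact ⟨c, rest, rfl⟩
      obtain ⟨mid, d, rfl⟩ : ∃ mid d, rest = mid ++ [d] := by
        rcases List.eq_nil_or_concat rest with h | ⟨mid, d, h⟩
        · subst h; simp at hm; omega
        · exact ⟨mid, d, by simpa using h⟩
      have hmid : mid.length = m - 2 := by simp at hm; omega
      have hdiv : m / 2 = (m - 2) / 2 + 1 := by omega
      rw [hdiv, List.range_succ_eq_map, List.foldl_cons, List.foldl_map]
      -- the first swap (t = 0)
      have e0 : pre.length + 0 = pre.length := by omega
      have e1 : pre.length + m - 1 - 0 = pre.length + (mid.length + 1) := by omega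
      have hgd : (pre ++ (c :: (mid ++ [d])) ++ post).getD (pre.length + (mid.length + 1)) ' ' = d := by
        rw [show pre ++ (c :: (mid ++ [d])) ++ post = (pre ++ c :: mid) ++ ([d] ++ post) by simp,
            List.getD_append_right _ _ _ _ (by simp)]
        simp
      have hgc : (pre ++ (c :: (mid ++ [d])) ++ post).getD pre.length ' ' = c := by
        rw [List.append_assoc, List.getD_append_right _ _ _ _ (by omega)]
        simp
      have hset : ((pre ++ (c :: (mid ++ [d])) ++ post).set pre.length d).set
          (pre.length + (mid.length + 1)) c = (pre ++ [d]) ++ mid ++ ([c] ++ post) := by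
        rw [List.append_assoc, List.set_append_right _ _ (by omega)]
        simp only [Nat.sub_self, List.cons_append, List.set_cons_zero]
        rw [show pre ++ d :: (mid ++ [d] ++ post) = (pre ++ d :: mid) ++ ([d] ++ post) from by simp,
            List.set_append_right _ _ (by simp only [List.length_append, List.length_cons]; omega)]
        simp [List.length_append]
      rw [e0, e1, hgd, hgc, hset]
      -- remaining swaps are the (m-2)-fold on pre' = pre ++ [d]
      have hfun : (fun (ch : List Char) (t : Nat) =>
            (ch.set (pre.length + Nat.succ t) (ch.getD (pre.length + m - 1 - Nat.succ t) ' ')).set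
              (pre.length + m - 1 - Nat.succ t) (ch.getD (pre.length + Nat.succ t) ' '))
          = (fun (ch : List Char) (t : Nat) =>
            (ch.set ((pre ++ [d]).length + t) (ch.getD ((pre ++ [d]).length + (m - 2) - 1 - t) ' ')).set
              ((pre ++ [d]).length + (m - 2) - 1 - t) (ch.getD ((pre ++ [d]).length + t) ' ')) := by
        funext ch t
        have ea : pre.length + Nat.succ t = (pre ++ [d]).length + t := by simp; omega
        have eb : pre.length + m - 1 - Nat.succ t = (pre ++ [d]).length + (m - 2) - 1 - t := by
          simp; omega
        rw [ea, eb]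
      rw [hfun, IH (m - 2) (by omega) (pre ++ [d]) mid ([c] ++ post) hmid]
      simp

-- bridge: the port's Int-indexed pyRange fold is the Nat-indexed fold above
theorem pv_swap_fold_int (m : Nat) (pre seg post : List Char) (hm : seg.length = m) :
    (PySem.List.pyRange 0 (PySem.Int.floordiv (m : Int) 2) 1).foldl
      (fun ch i =>
        (ch.set ((pre.length : Int) + i).toNat (ch.getD ((pre.length : Int) + (m : Int) - 1 - i).toNat ' ')).set
          ((pre.length : Int) + (m : Int) - 1 - i).toNat (ch.getD ((pre.length : Int) + i).toNat ' '))
      (pre ++ seg ++ post)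
    = pre ++ seg.reverse ++ post := by
  have hfd : PySem.Int.floordiv (m : Int) 2 = ((m / 2 : Nat) : Int) := by
    exact_mod_cast PySem.Int.floordiv_natCast m 2
  rw [hfd, PySem.List.pyRange_one, List.foldl_map]
  have hlen : (((m / 2 : Nat) : Int) - 0).toNat = m / 2 := by omega
  rw [hlen]
  have hfun : (fun (ch : List Char) (t : Nat) =>
        (ch.set ((pre.length : Int) + (0 + (t : Int))).toNat
            (ch.getD ((pre.length : Int) + (m : Int) - 1 - (0 + (t : Int))).toNat ' ')).set
          ((pre.length : Int) + (m : Int) - 1 - (0 + (t : Int))).toNat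
            (ch.getD ((pre.length : Int) + (0 + (t : Int))).toNat ' '))
      = (fun (ch : List Char) (t : Nat) =>
        (ch.set (pre.length + t) (ch.getD (pre.length + m - 1 - t) ' ')).set
          (pre.length + m - 1 - t) (ch.getD (pre.length + t) ' ')) := by
    funext ch t
    have ea : ((pre.length : Int) + (0 + (t : Int))).toNat = pre.length + t := by omega
    have eb : ((pre.length : Int) + (m : Int) - 1 - (0 + (t : Int))).toNat = pre.length + m - 1 - t := by
      omega
    rw [ea, eb]
  rw [hfun, pv_swap_fold m pre seg post hm]

theorem pvLoopA_exit (l k : Int) (f : Nat) (left : Int) (chars : List Char) (h : l ≤ left) :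
    pvLoopA l k f left chars = chars := by
  cases f with
  | zero => rfl
  | succ f => simp [pvLoopA, not_lt.mpr h]

theorem pvLoopB_exit (cs : List Char) (n k : Int) (f : Nat) (i : Int) (acc : List Char) (h : n ≤ i) :
    pvLoopB cs n k f i acc = acc := by
  cases f with
  | zero => rfl
  | succ f => simp [pvLoopB, not_lt.mpr h]

theorem pv_main (k : Int) (hk : 1 ≤ k) (cs : List Char) :
    ∀ (fuel : Nat) (j : Nat) (done : List Char), done.length = j → cs.length - j ≤ fuel →
      pvLoopA (cs.length : Int) k fuel (j : Int) (done ++ cs.drop j)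
        = pvLoopB cs (cs.length : Int) k fuel (j : Int) done := by
  intro fuel
  induction fuel with
  | zero =>
    intro j done hd hf
    have hle : cs.length ≤ j := by omega
    simp [pvLoopA, pvLoopB, List.drop_eq_nil_of_le hle]
  | succ fuel IH =>
    intro j done hd hf
    subst hd
    by_cases hj : done.length < cs.length
    case neg =>
      have hle : (cs.length : Int) ≤ (done.length : Int) := by omega
      rw [pvLoopA_exit _ _ _ _ _ hle, pvLoopB_exit _ _ _ _ _ _ hle,
          List.drop_eq_nil_of_le (by omega), List.append_nil]
    case pos =>
      have hlt : ((done.length : Nat) : Int) < (cs.length : Int) := by omega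
      simp only [pvLoopA, pvLoopB, if_pos hlt]
      set dl := done.length with hdl
      set kn := k.toNat with hknd
      have hkcast : (kn : Int) = k := Int.toNat_of_nonneg (by omega)
      set r := cs.length - dl with hr
      set m := min kn r with hmdef
      have hkn1 : 1 ≤ kn := by omega
      have hrev : min k ((cs.length : Int) - (dl : Int)) = ((m : Nat) : Int) := by omega
      rw [hrev]
      -- A's inner loop reverses the first m chars of cs.drop dl
      have hsplit : cs.drop dl = (cs.drop dl).take m ++ (cs.drop dl).drop m :=
        (List.take_append_drop m _).symm
      have hseglen : ((cs.drop dl).take m).length = m := by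
        simp only [List.length_take, List.length_drop]; omega
      rw [hsplit, ← List.append_assoc,
          pv_swap_fold_int m done ((cs.drop dl).take m) ((cs.drop dl).drop m) hseglen]
      -- B's slices
      have hs1 : PySem.List.slice cs (some (dl : Int)) (some ((dl : Int) + k)) = (cs.drop dl).take kn := by
        rw [← hkcast]; exact PySem.List.slice_natCast_add cs dl kn
      have hs2 : PySem.List.slice cs (some ((dl : Int) + k)) (some ((dl : Int) + 2 * k))
          = (cs.drop (dl + kn)).take kn := by
        rw [← hkcast, show ((dl : Int) + (kn : Int)) = ((dl + kn : Nat) : Int) by push_cast; ring,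
            show ((dl : Int) + 2 * (kn : Int)) = ((dl + kn : Nat) : Int) + (kn : Int) by push_cast; ring]
        exact PySem.List.slice_natCast_add cs (dl + kn) kn
      rw [hs1, hs2]
      rcases Nat.lt_or_ge r (2 * kn) with hcase | hcase
      · -- terminal step: both indices pass the end, both loops stop next
        have hA : (cs.length : Int) ≤ (dl : Int) + (m : Int) - 1 + 1 + k := by omega
        have hB : (cs.length : Int) ≤ (dl : Int) + 2 * k := by omega
        rw [pvLoopA_exit _ _ _ _ _ hA, pvLoopB_exit _ _ _ _ _ _ hB]
        have ht : (cs.drop dl).take m = (cs.drop dl).take kn := by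
          rcases Nat.le_total kn r with h | h
          · rw [show m = kn by omega]
          · rw [show m = r by omega, List.take_of_length_le (by simp only [List.length_drop]; omega),
                List.take_of_length_le (by simp only [List.length_drop]; omega)]
        have hdrop : (cs.drop dl).drop m = (cs.drop (dl + kn)).take kn := by
          rw [List.drop_drop]
          rcases Nat.le_total kn r with h | h
          · rw [show dl + m = dl + kn by omega,
                List.take_of_length_le (by simp only [List.length_drop]; omega)]
          · rw [show dl + m = dl + r by omega, List.drop_eq_nil_of_le (by omega),
                List.drop_eq_nil_of_le (by omega), List.take_nil]
        rw [ht, hdrop]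
      · -- continue: m = kn, both advance to dl + 2*kn
        have hm : m = kn := by omega
        have harg1 : ((dl : Int) + (m : Int) - 1 + 1 + k) = ((dl + 2 * kn : Nat) : Int) := by omega
        have harg2 : ((dl : Int) + 2 * k) = ((dl + 2 * kn : Nat) : Int) := by omega
        have hacc : done ++ ((cs.drop dl).take m).reverse ++ (cs.drop dl).drop m
            = (done ++ ((cs.drop dl).take kn).reverse ++ (cs.drop (dl + kn)).take kn)
              ++ cs.drop (dl + 2 * kn) := by
          rw [hm, List.drop_drop]
          have : (cs.drop (dl + kn)).take kn ++ cs.drop (dl + 2 * kn) = cs.drop (dl + kn) := by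
            conv_rhs => rw [← List.take_append_drop kn (cs.drop (dl + kn))]
            rw [List.drop_drop, show dl + kn + kn = dl + 2 * kn by omega]
          simp only [List.append_assoc]
          rw [this]
        have hlen2 : (done ++ ((cs.drop dl).take kn).reverse ++ (cs.drop (dl + kn)).take kn).length
            = dl + 2 * kn := by
          simp only [List.length_take, List.length_drop, List.length_append,
            List.length_reverse]; omega
        rw [harg1, harg2, hacc]
        exact IH (dl + 2 * kn) _ hlen2 (by omega)

-- ===== VERDICT =====
theorem reverseStr_spec : Claim_equal_reverseStr := by
  intro s k hdom hpre
  unfold Spec_reverseStr reverseStr reverseStr_alt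
  rcases hpre with h | hk
  · subst h; rfl
  · have := pv_main k hk s.toList (s.toList.length + 1) 0 [] rfl (by omega)
    simpa using congrArg String.ofList this
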